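-- pv_equiv track=rewrite | github.com/jjoeluna/building-os-platform | tests/api/diagnose_api.py | _check_cors_headers
-- ===== SOURCE A (Python) =====
-- from typing import Dict, List, Any
--
-- def _check_cors_headers(headers: Dict) -> bool:
--     """Check if CORS headers are present"""
--     cors_headers = [
--         "access-control-allow-origin",
--         "access-control-allow-methods",
--         "access-control-allow-headers",
--     ]
--     headers_lower = {k.lower(): v for k, v in headers.items()}
--     return any(header in headers_lower for header in cors_headers)
-- ===== SOURCE B (Python) =====
-- def _check_cors_headers(headers) -> bool:
--     """Check if CORS headers are present"""
--     PREFIX = "access-control-allow-"  # len 21; all three CORS names share it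
--     for key in headers:
--         k = key.lower()
--         if k[:21] == PREFIX and k[21:] in ("origin", "methods", "headers"):
--             return True
--     return False
-- ===== Notes on version B (the rewrite author's own statement) =====
-- stated objective: alternative
-- what changed: B drops A's lowercased dict copy probed by three fixed names; instead an early-returning loop over the keys decomposes the match itself, splitting each lowercased key at position 21 into the shared prefix 'access-control-allow-' and a suffix tested against origin/methods/headers.
import Mathlib
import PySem

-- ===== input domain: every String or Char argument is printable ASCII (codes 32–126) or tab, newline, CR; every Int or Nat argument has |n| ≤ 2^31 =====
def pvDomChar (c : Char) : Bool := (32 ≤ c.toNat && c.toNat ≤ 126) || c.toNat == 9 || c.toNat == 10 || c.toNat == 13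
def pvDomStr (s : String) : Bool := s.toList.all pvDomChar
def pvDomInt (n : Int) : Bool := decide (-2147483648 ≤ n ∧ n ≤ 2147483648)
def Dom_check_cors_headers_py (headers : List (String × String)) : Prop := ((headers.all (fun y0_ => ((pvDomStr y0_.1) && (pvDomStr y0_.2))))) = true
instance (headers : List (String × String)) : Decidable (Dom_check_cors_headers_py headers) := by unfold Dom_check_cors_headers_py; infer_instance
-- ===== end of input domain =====

-- B replaces A's lowercased dict copy probed by three fixed names with an early-returning
-- scan over the keys with early return, matching each lowercased key as prefix "access-control-allow-"
-- (split at index 21) plus a suffix in {origin, methods, headers} (objective: alternative).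

-- ===== PORT A =====
def pvCorsList : List String :=
  ["access-control-allow-origin", "access-control-allow-methods", "access-control-allow-headers"]

-- headers_lower = {k.lower(): v for k, v in headers.items()}
def check_cors_headers_py (headers : List (String × String)) : Bool :=
  let headers_lower : PySem.Dict String String :=
    headers.foldl (fun d p => d.insert (PySem.Str.lower p.1) p.2) PySem.Dict.empty
  pvCorsList.any (fun h => headers_lower.contains h)

-- ===== PORT B =====
-- the for-loop with early return, as structural recursion over the key list
def pvScan : List (String × String) → Bool
  | [] => false
  | p :: t =>
    let k := PySem.Str.lower p.1
    if (PySem.Str.slice k none (some 21) == "access-control-allow-") &&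
       ((PySem.Str.slice k (some 21) none == "origin") ||
        (PySem.Str.slice k (some 21) none == "methods") ||
        (PySem.Str.slice k (some 21) none == "headers"))
    then true
    else pvScan t

def check_cors_headers_py_alt (headers : List (String × String)) : Bool :=
  pvScan headers

-- ===== PRECONDITION & SPEC =====
def Spec_check_cors_headers_py (headers : List (String × String)) (out : Bool) : Prop := out = check_cors_headers_py_alt headers
instance (headers : List (String × String)) (out : Bool) : Decidable (Spec_check_cors_headers_py headers out) := by unfold Spec_check_cors_headers_py; infer_instance

-- ===== CLAIM (what is proved, stated in full; the proofs are below) =====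
def Claim_equal_check_cors_headers_py : Prop := ∀ (headers : List (String × String)), Dom_check_cors_headers_py headers → Spec_check_cors_headers_py headers (check_cors_headers_py headers)

-- ===== LEMMAS AND PROOFS =====

-- splitting a list at 21 matches (prefix, suffix) iff the list is their concatenation
theorem take_drop_eq_iff (l a b : List Char) (ha : a.length = 21) :
    (l.take 21 = a ∧ l.drop 21 = b) ↔ l = a ++ b := by
  constructor
  · rintro ⟨h1, h2⟩
    rw [← List.take_append_drop 21 l, h1, h2]
  · rintro rfl
    constructor
    · rw [← ha, List.take_left]
    · rw [← ha, List.drop_left]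

-- B's prefix/suffix test on one key equals membership in the three full CORS names
theorem key_match (s : String) :
    ((PySem.Str.slice s none (some 21) == "access-control-allow-") &&
     ((PySem.Str.slice s (some 21) none == "origin") ||
      (PySem.Str.slice s (some 21) none == "methods") ||
      (PySem.Str.slice s (some 21) none == "headers")))
    = (s == "access-control-allow-origin" || s == "access-control-allow-methods" ||
       s == "access-control-allow-headers") := by
  rw [Bool.eq_iff_iff]
  simp only [Bool.and_eq_true, Bool.or_eq_true, beq_iff_eq, ← String.toList_inj,
    PySem.Str.toList_slice, PySem.Chars.slice_eq_listSlice]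
  rw [show ((21 : Int) = ((21 : Nat) : Int)) from rfl, PySem.List.slice_to_natCast,
    PySem.List.slice_from_natCast]
  rw [and_or_left, and_or_left,
    take_drop_eq_iff s.toList "access-control-allow-".toList "origin".toList (by decide),
    take_drop_eq_iff s.toList "access-control-allow-".toList "methods".toList (by decide),
    take_drop_eq_iff s.toList "access-control-allow-".toList "headers".toList (by decide)]
  rw [show "access-control-allow-".toList ++ "origin".toList = "access-control-allow-origin".toList by decide,
    show "access-control-allow-".toList ++ "methods".toList = "access-control-allow-methods".toList by decide,
    show "access-control-allow-".toList ++ "headers".toList = "access-control-allow-headers".toList by decide]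

-- the dict-comprehension fold contains k iff the seed does or some header lowercases to k
theorem contains_foldl_insert_lower (headers : List (String × String))
    (d : PySem.Dict String String) (k : String) :
    (headers.foldl (fun d p => d.insert (PySem.Str.lower p.1) p.2) d).contains k
      = (d.contains k || headers.any (fun p => k == PySem.Str.lower p.1)) := by
  induction headers generalizing d with
  | nil => simp
  | cons p t ih =>
    simp only [List.foldl_cons, List.any_cons, ih, PySem.Dict.contains_insert]
    cases h : (k == PySem.Str.lower p.1)
    · simp
    · simp [Bool.or_comm]

-- B's recursion computes "some key's lowercase is one of the three names"
theorem pvScan_eq_any (headers : List (String × String)) :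
    pvScan headers = headers.any (fun p =>
      (PySem.Str.lower p.1 == "access-control-allow-origin") ||
      (PySem.Str.lower p.1 == "access-control-allow-methods") ||
      (PySem.Str.lower p.1 == "access-control-allow-headers")) := by
  induction headers with
  | nil => rfl
  | cons p t ih =>
    simp only [pvScan, key_match, List.any_cons, ih]
    cases h : ((PySem.Str.lower p.1 == "access-control-allow-origin") ||
      (PySem.Str.lower p.1 == "access-control-allow-methods") ||
      (PySem.Str.lower p.1 == "access-control-allow-headers")) <;> simp

-- ===== VERDICT (by name: the statement is the Claim_ definition above) =====
theorem check_cors_headers_py_spec : Claim_equal_check_cors_headers_py := by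
  intro headers _
  unfold Spec_check_cors_headers_py check_cors_headers_py check_cors_headers_py_alt
  simp only [contains_foldl_insert_lower, PySem.Dict.contains_empty, Bool.false_or,
    pvScan_eq_any]
  rw [Bool.eq_iff_iff]
  simp only [List.any_eq_true, pvCorsList, List.any_cons, List.any_nil, Bool.or_eq_true,
    Bool.false_eq_true, or_false, beq_iff_eq]
  constructor
  · rintro (⟨p, hp, h⟩ | ⟨p, hp, h⟩ | ⟨p, hp, h⟩)
    exacts [⟨p, hp, Or.inl (Or.inl h.symm)⟩, ⟨p, hp, Or.inl (Or.inr h.symm)⟩, ⟨p, hp, Or.inr h.symm⟩]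
  · rintro ⟨p, hp, ((h | h) | h)⟩
    exacts [Or.inl ⟨p, hp, h.symm⟩, Or.inr (Or.inl ⟨p, hp, h.symm⟩), Or.inr (Or.inr ⟨p, hp, h.symm⟩)]
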